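-- pv_equiv track=rewrite | github.com/jinyes-kim/Algorithm | codility/lesson12_ChocolatesByNumbers.py | solution
-- ===== SOURCE A (Python) =====
-- def solution(N, M):
--     answer = 0
--     pivot = 0
--     check_list = [False] * N
--
--     while check_list[pivot] != True:
--         check_list[pivot] = True
--         pivot = (pivot + M) % N
--         answer += 1
--
--     return answer
-- ===== SOURCE B (Python) =====
-- def solution(N, M):
--     # Euclid's algorithm: the chocolate cycle has length N // gcd(N, M).
--     a = N
--     b = M % N
--     while b:
--         a, b = b, a % b
--     return N // a
-- ===== Notes on version B (the rewrite author's own statement) =====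
-- stated objective: faster
-- what changed: A simulates the eating process with an O(N) boolean visited array; B computes the cycle length directly as N // gcd(N, M) using Euclid's algorithm, no array at all.
import Mathlib
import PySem

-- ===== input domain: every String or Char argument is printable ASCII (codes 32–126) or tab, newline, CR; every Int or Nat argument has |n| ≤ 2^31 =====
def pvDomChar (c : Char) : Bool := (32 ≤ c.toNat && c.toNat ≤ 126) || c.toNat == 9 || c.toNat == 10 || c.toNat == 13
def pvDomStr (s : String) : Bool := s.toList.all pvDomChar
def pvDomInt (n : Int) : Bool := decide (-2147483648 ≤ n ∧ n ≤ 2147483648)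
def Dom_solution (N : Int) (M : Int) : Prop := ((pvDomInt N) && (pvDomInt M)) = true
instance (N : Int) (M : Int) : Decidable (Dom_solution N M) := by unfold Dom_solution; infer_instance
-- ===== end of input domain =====

-- B replaces A's O(N) visited-array simulation by Euclid's algorithm: the answer is N // gcd(N, M).

-- ===== PORT A =====
-- Python-list indexing/assignment for an Array-backed check_list (exact: same
-- index normalisation as PySem.List.pyGet? / pySetD, O(1) on Array)
def pyGetA? (cl : Array Bool) (i : Int) : Option Bool :=
  (PySem.List.pyIdx? cl.size i).bind fun k => cl[k]?

def pySetAD (cl : Array Bool) (i : Int) (v : Bool) : Array Bool :=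
  match PySem.List.pyIdx? cl.size i with
  | some k => cl.setIfInBounds k v
  | none => cl

theorem pyGetA?_toList (cl : Array Bool) (i : Int) :
    pyGetA? cl i = PySem.List.pyGet? cl.toList i := by
  unfold pyGetA? PySem.List.pyGet?
  rw [Array.length_toList]
  cases PySem.List.pyIdx? cl.size i with
  | none => rfl
  | some k => simp [Array.getElem?_toList]

theorem pySetAD_toList (cl : Array Bool) (i : Int) (v : Bool) :
    (pySetAD cl i v).toList = PySem.List.pySetD cl.toList i v := by
  unfold pySetAD PySem.List.pySetD PySem.List.pySet?
  rw [Array.length_toList]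
  cases PySem.List.pyIdx? cl.size i with
  | none => rfl
  | some k => simp [Array.toList_setIfInBounds]

-- termination helper for A's while loop: marking a cell that was False strictly
-- decreases the number of False cells (cited below in decreasing_by)
theorem pv_count_lt (cl : List Bool) (i : Int)
    (h : PySem.List.pyGet? cl i = some false) :
    (PySem.List.pySetD cl i true).count false < cl.count false := by
  unfold PySem.List.pyGet? at h
  unfold PySem.List.pySetD PySem.List.pySet?
  cases hk : PySem.List.pyIdx? cl.length i with
  | none => rw [hk] at h; simp at h
  | some k =>
    rw [hk] at h
    simp only [Option.bind_some, Option.map_some, Option.getD_some] at h ⊢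
    have hklen : k < cl.length := by
      by_contra hh
      rw [List.getElem?_eq_none (by omega)] at h
      simp at h
    have hget : cl[k] = false := by
      have h2 := List.getElem?_eq_getElem hklen
      rw [h2] at h
      exact Option.some.inj h
    have hpos : 0 < cl.count false := by
      have : false ∈ cl := by
        rw [← hget]; exact List.getElem_mem hklen
      exact List.count_pos_iff.mpr this
    rw [List.count_set hklen]
    simp [hget]
    exact List.count_pos_iff.mp hpos

-- A's while loop: state (check_list, pivot, answer); the write check_list[pivot] = True
-- is pySetAD (exact: Python reads check_list[pivot] first, so the write is in range)
def loopA (cl : Array Bool) (pivot : Int) (answer : Int) (M : Int) (N : Int) : Int :=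
  match h : pyGetA? cl pivot with
  | none => answer          -- Python raises IndexError here; excluded by Pre_solution
  | some b =>
    if b = true then answer
    else loopA (pySetAD cl pivot true) (PySem.Int.mod (pivot + M) N) (answer + 1) M N
termination_by cl.toList.count false
decreasing_by
  rw [pySetAD_toList]
  exact pv_count_lt cl.toList pivot (by rw [← pyGetA?_toList, h]; simp_all)

def solution (N : Int) (M : Int) : Int :=
  loopA (PySem.List.pyRepeat [false] N).toArray 0 0 M N

-- ===== PORT B =====
-- Source B: 'a = N; b = M % N; while b: a, b = b, a % b; return N // a'
def gcdLoopB (a : Int) (b : Int) : Int :=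
  if b = 0 then a else gcdLoopB b (PySem.Int.mod a b)
termination_by b.natAbs
decreasing_by
  rename_i hb
  rcases lt_or_gt_of_ne hb with hneg | hpos
  · have := PySem.Int.mod_neg_bounds a hneg
    omega
  · have h1 := PySem.Int.mod_nonneg a hpos
    have h2 := PySem.Int.mod_lt a hpos
    omega

def solution_alt (N : Int) (M : Int) : Int :=
  PySem.Int.floordiv N (gcdLoopB N (PySem.Int.mod M N))

-- ===== PRECONDITION & SPEC =====
-- Pre_ excludes exactly N ≤ 0, where the Python A raises (IndexError on check_list[0]
-- for N ≤ 0, since [False] * N is empty); A returns on every N ≥ 1 and any M.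
def Pre_solution (N : Int) (M : Int) : Prop := 1 ≤ N
instance (N : Int) (M : Int) : Decidable (Pre_solution N M) := by unfold Pre_solution; infer_instance
def pvWitness_solution : Int × Int := (10, 4)

def Spec_solution (N : Int) (M : Int) (out : Int) : Prop := out = solution_alt N M
instance (N : Int) (M : Int) (out : Int) : Decidable (Spec_solution N M out) := by unfold Spec_solution; infer_instance

-- ===== CLAIM (what is proved, stated in full; the proofs are below) =====
def Claim_equal_solution : Prop := ∀ (N : Int) (M : Int), Dom_solution N M → Pre_solution N M → Spec_solution N M (solution N M)

-- ===== LEMMAS AND PROOFS =====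

-- ---- B side: gcdLoopB computes Nat.gcd on nonnegative inputs ----
theorem gcdLoopB_eq (b a : Nat) : gcdLoopB (a : Int) (b : Int) = (Nat.gcd a b : Int) := by
  induction b using Nat.strong_induction_on generalizing a with
  | _ b ih =>
    rw [gcdLoopB]
    by_cases hb : b = 0
    · subst hb; simp
    · have hbI : ((b : Int)) ≠ 0 := by exact_mod_cast hb
      rw [if_neg hbI]
      have hmod : PySem.Int.mod (a : Int) (b : Int) = ((a % b : Nat) : Int) := by
        simp [pysem]
      rw [hmod, ih (a % b) (Nat.mod_lt a (Nat.pos_of_ne_zero hb))]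
      rw [Nat.gcd_comm b (a % b), ← Nat.gcd_rec, Nat.gcd_comm]

theorem solution_alt_closed (n m' : Nat) (M : Int)
    (hM : PySem.Int.mod M (n : Int) = (m' : Int)) :
    solution_alt (n : Int) M = ((n / Nat.gcd n m' : Nat) : Int) := by
  unfold solution_alt
  rw [hM, gcdLoopB_eq]
  exact_mod_cast PySem.Int.floordiv_natCast n (Nat.gcd n m')

-- ---- A side: the check_list after j loop iterations ----

def markL (m' n j : Nat) : List Bool :=
  (List.range n).map (fun p => decide (∃ i, i < j ∧ (i * m') % n = p))

theorem markL_length (m' n j : Nat) : (markL m' n j).length = n := by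
  unfold markL; simp

theorem markL_zero (m' n : Nat) : markL m' n 0 = List.replicate n false := by
  unfold markL
  apply List.ext_getElem <;> simp

theorem markL_get (m' n j p : Nat) (hp : p < n) :
    (markL m' n j)[p]? = some (decide (∃ i, i < j ∧ (i * m') % n = p)) := by
  unfold markL
  simp [hp]

theorem markL_set (m' n j : Nat) (hjp : (j * m') % n < n) :
    (markL m' n j).set ((j * m') % n) true = markL m' n (j + 1) := by
  apply List.ext_getElem?
  intro p
  by_cases hp : p < n
  · rw [List.getElem?_set]
    rw [markL_get m' n (j+1) p hp]
    by_cases he : (j * m') % n = p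
    · rw [if_pos he, if_pos (by rw [markL_length]; omega)]
      simp only [Option.some.injEq]
      exact (decide_eq_true ⟨j, by omega, he⟩).symm
    · rw [if_neg he, markL_get m' n j p hp]
      simp only [Option.some.injEq, decide_eq_decide]
      constructor
      · rintro ⟨i, hi, hie⟩; exact ⟨i, by omega, hie⟩
      · rintro ⟨i, hi, hie⟩
        refine ⟨i, ?_, hie⟩
        rcases Nat.lt_succ_iff_lt_or_eq.mp hi with h | h
        · exact h
        · subst h; exact absurd hie he
  · rw [List.getElem?_eq_none (by rw [List.length_set, markL_length]; omega),
        List.getElem?_eq_none (by rw [markL_length]; omega)]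

theorem pv_step (n m' j : Nat) (hn : 0 < n) (hm : m' < n) (M : Int)
    (hM : PySem.Int.mod M (n : Int) = (m' : Int)) :
    PySem.Int.mod (((j * m') % n : Nat) + M) (n : Int) = (((j + 1) * m') % n : Nat) := by
  have hnpos : (0 : Int) < (n : Int) := by exact_mod_cast hn
  rw [PySem.Int.mod_eq_emod_of_pos hnpos] at hM ⊢
  rw [Int.add_emod, hM]
  have hp : ((((j * m') % n : Nat) : Int)) % (n : Int) = (((j * m') % n : Nat) : Int) := by
    exact Int.emod_eq_of_lt (by positivity) (by exact_mod_cast Nat.mod_lt _ hn)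
  rw [hp]
  rw [← Int.natCast_add, ← Int.natCast_mod]
  congr 1
  rw [Nat.succ_mul, Nat.add_mod (j * m') m' n, Nat.mod_eq_of_lt hm]

def loopAList (cl : List Bool) (pivot : Int) (answer : Int) (M : Int) (N : Int) : Int :=
  match h : PySem.List.pyGet? cl pivot with
  | none => answer
  | some b =>
    if b = true then answer
    else loopAList (PySem.List.pySetD cl pivot true) (PySem.Int.mod (pivot + M) N) (answer + 1) M N
termination_by cl.count false
decreasing_by
  exact pv_count_lt cl pivot (by rw [h]; simp_all)

-- the Array-backed port computes the List-state loop
theorem loopA_of_none (cl : Array Bool) (p a M N : Int) (hb : pyGetA? cl p = none) :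
    loopA cl p a M N = a := by
  rw [loopA]
  split
  · rfl
  · rename_i b hsome
    rw [hb] at hsome
    simp at hsome

theorem loopA_of_true (cl : Array Bool) (p a M N : Int) (hb : pyGetA? cl p = some true) :
    loopA cl p a M N = a := by
  rw [loopA]
  split
  · rfl
  · rename_i b hsome
    rw [hb] at hsome
    cases hsome
    simp

theorem loopA_of_false (cl : Array Bool) (p a M N : Int) (hb : pyGetA? cl p = some false) :
    loopA cl p a M N = loopA (pySetAD cl p true) (PySem.Int.mod (p + M) N) (a + 1) M N := by
  rw [loopA]
  split
  · simp_all
  · rename_i b hsome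
    rw [hb] at hsome
    cases hsome
    simp

theorem loopAList_of_none (cl : List Bool) (p a M N : Int) (hb : PySem.List.pyGet? cl p = none) :
    loopAList cl p a M N = a := by
  rw [loopAList]
  split
  · rfl
  · rename_i b hsome
    rw [hb] at hsome
    simp at hsome

theorem loopAList_of_true (cl : List Bool) (p a M N : Int) (hb : PySem.List.pyGet? cl p = some true) :
    loopAList cl p a M N = a := by
  rw [loopAList]
  split
  · rfl
  · rename_i b hsome
    rw [hb] at hsome
    cases hsome
    simp

theorem loopAList_of_false (cl : List Bool) (p a M N : Int) (hb : PySem.List.pyGet? cl p = some false) :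
    loopAList cl p a M N = loopAList (PySem.List.pySetD cl p true) (PySem.Int.mod (p + M) N) (a + 1) M N := by
  rw [loopAList]
  split
  · simp_all
  · rename_i b hsome
    rw [hb] at hsome
    cases hsome
    simp

theorem loopA_eq_list (M N : Int) (cl : Array Bool) (p a : Int) :
    loopA cl p a M N = loopAList cl.toList p a M N := by
  induction cl, p, a using loopA.induct M N with
  | case1 cl p a h =>
    rw [loopA_of_none _ _ _ _ _ h, loopAList_of_none _ _ _ _ _ (by rw [← pyGetA?_toList]; exact h)]
  | case2 cl p a h =>
    rw [loopA_of_true _ _ _ _ _ h, loopAList_of_true _ _ _ _ _ (by rw [← pyGetA?_toList]; exact h)]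
  | case3 cl p a b h hb ih =>
    have hb' : b = false := by cases b <;> simp_all
    subst hb'
    rw [loopA_of_false _ _ _ _ _ h,
        loopAList_of_false _ _ _ _ _ (by rw [← pyGetA?_toList]; exact h), ih, pySetAD_toList]


theorem pv_dvd (n m' : Nat) (hn : 0 < n) {d : Nat} (hd : n ∣ d * m') :
    (n / Nat.gcd n m') ∣ d := by
  set g := Nat.gcd n m' with hg
  have hgpos : 0 < g := Nat.gcd_pos_of_pos_left m' hn
  obtain ⟨c, hc⟩ := hd
  have h1 : d * (m' / g) * g = (n / g) * c * g := by
    calc d * (m' / g) * g = d * (m' / g * g) := by ring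
    _ = d * m' := by rw [Nat.div_mul_cancel (Nat.gcd_dvd_right n m')]
    _ = n * c := hc
    _ = (n / g * g) * c := by rw [Nat.div_mul_cancel (Nat.gcd_dvd_left n m')]
    _ = (n / g) * c * g := by ring
  have h2 : d * (m' / g) = (n / g) * c := Nat.eq_of_mul_eq_mul_right hgpos h1
  have hcop : Nat.Coprime (n / g) (m' / g) := Nat.coprime_div_gcd_div_gcd hgpos
  exact hcop.dvd_of_dvd_mul_right ⟨c, h2⟩

theorem pv_distinct (n m' : Nat) (hn : 0 < n) {i j : Nat} (hij : i < j)
    (hjL : j < n / Nat.gcd n m') : (i * m') % n ≠ (j * m') % n := by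
  intro he
  have hmodeq : i * m' ≡ j * m' [MOD n] := he
  have hdvd : n ∣ j * m' - i * m' :=
    (Nat.modEq_iff_dvd' (Nat.mul_le_mul_right m' (Nat.le_of_lt hij))).mp hmodeq
  rw [← Nat.sub_mul] at hdvd
  have hL := pv_dvd n m' hn hdvd
  have hd0 : 0 < j - i := by omega
  have := Nat.le_of_dvd hd0 hL
  omega

theorem pv_cycle_zero (n m' : Nat) :
    ((n / Nat.gcd n m') * m') % n = 0 := by
  set g := Nat.gcd n m' with hg
  have hdvd : n ∣ (n / g) * m' := by
    have heq : (n / g) * m' = n * (m' / g) := by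
      calc (n / g) * m' = (n / g) * (m' / g * g) := by rw [Nat.div_mul_cancel (Nat.gcd_dvd_right n m')]
      _ = (n / g * g) * (m' / g) := by ring
      _ = n * (m' / g) := by rw [Nat.div_mul_cancel (Nat.gcd_dvd_left n m')]
    exact heq ▸ Dvd.intro (m' / g) rfl
  exact Nat.mod_eq_zero_of_dvd hdvd

theorem loopAList_inv (n m' : Nat) (hn : 0 < n) (hm : m' < n) (M : Int)
    (hM : PySem.Int.mod M (n : Int) = (m' : Int)) :
    ∀ k j, 1 ≤ j → j + k = n / Nat.gcd n m' →
    loopAList (markL m' n j) ((((j * m') % n : Nat)) : Int) (j : Int) M (n : Int)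
      = ((n / Nat.gcd n m' : Nat) : Int) := by
  intro k
  induction k with
  | zero =>
    intro j hj1 hjL
    have hjeq : j = n / Nat.gcd n m' := by omega
    have hget : PySem.List.pyGet? (markL m' n j) (((j * m') % n : Nat) : Int) = some true := by
      rw [PySem.List.pyGet?_natCast, markL_get m' n j _ (Nat.mod_lt _ hn)]
      congr 1
      apply decide_eq_true
      refine ⟨0, by omega, ?_⟩
      rw [Nat.zero_mul, Nat.zero_mod, hjeq]
      exact (pv_cycle_zero n m').symm
    rw [loopAList_of_true _ _ _ _ _ hget, hjeq]
  | succ k ih =>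
    intro j hj1 hjL
    have hjlt : j < n / Nat.gcd n m' := by omega
    have hget : PySem.List.pyGet? (markL m' n j) (((j * m') % n : Nat) : Int) = some false := by
      rw [PySem.List.pyGet?_natCast, markL_get m' n j _ (Nat.mod_lt _ hn)]
      congr 1
      apply decide_eq_false
      rintro ⟨i, hi, hie⟩
      exact pv_distinct n m' hn hi hjlt hie
    rw [loopAList_of_false _ _ _ _ _ hget, PySem.List.pySetD_natCast,
        markL_set m' n j (Nat.mod_lt _ hn), pv_step n m' j hn hm M hM]
    have hcast : (j : Int) + 1 = ((j + 1 : Nat) : Int) := by push_cast; ring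
    rw [hcast]
    exact ih (j + 1) (by omega) (by omega)

theorem pv_L_pos (n m' : Nat) (hn : 0 < n) : 1 ≤ n / Nat.gcd n m' :=
  Nat.div_pos (Nat.le_of_dvd hn (Nat.gcd_dvd_left n m')) (Nat.gcd_pos_of_pos_left m' hn)

-- A equals the closed form on Pre_
theorem solution_closed (n m' : Nat) (hn : 0 < n) (hm : m' < n) (M : Int)
    (hM : PySem.Int.mod M (n : Int) = (m' : Int)) :
    solution (n : Int) M = ((n / Nat.gcd n m' : Nat) : Int) := by
  unfold solution
  rw [loopA_eq_list, List.toList_toArray]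
  have hrep : PySem.List.pyRepeat [false] (n : Int) = markL m' n 0 := by
    rw [markL_zero, PySem.List.pyRepeat_singleton]
    simp
  have h0 : (0 : Int) = (((0 * m') % n : Nat) : Int) := by simp
  rw [hrep, h0]
  have hget : PySem.List.pyGet? (markL m' n 0) (((0 * m') % n : Nat) : Int) = some false := by
    rw [PySem.List.pyGet?_natCast, markL_get m' n 0 _ (Nat.mod_lt _ hn)]
    simp
  rw [loopAList_of_false _ _ _ _ _ hget, PySem.List.pySetD_natCast,
      markL_set m' n 0 (Nat.mod_lt _ hn), pv_step n m' 0 hn hm M hM]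
  have h1 : (((0 * m') % n : Nat) : Int) + 1 = ((1 : Nat) : Int) := by simp
  rw [h1]
  exact loopAList_inv n m' hn hm M hM (n / Nat.gcd n m' - 1) 1 (by omega)
    (by have := pv_L_pos n m' hn; omega)

-- ===== VERDICT (by name: the statement is the Claim_ definition above) =====
theorem solution_spec : Claim_equal_solution := by
  intro N M _ hpre
  unfold Spec_solution
  have hN1 : (1 : Int) ≤ N := hpre
  have hNpos : (0 : Int) < N := by omega
  set n := N.toNat with hn
  have hNn : N = (n : Int) := by omega
  have hnpos : 0 < n := by omega
  set m' := (PySem.Int.mod M N).toNat with hm'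
  have hMn : PySem.Int.mod M N = (m' : Int) := by
    have := PySem.Int.mod_nonneg M hNpos
    omega
  have hmlt : m' < n := by
    have := PySem.Int.mod_lt M hNpos
    omega
  rw [hNn] at hMn ⊢
  rw [solution_closed n m' hnpos hmlt M hMn, solution_alt_closed n m' M hMn]
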